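-- pv_equiv track=rewrite | github.com/IronDizaster/Polished-Sand-Simulation-in-Python-Tkinter | Sand Simulator.py | find_distance_to_nearest_grid_space
-- ===== SOURCE A (Python) =====
-- def find_distance_to_nearest_grid_space(x, y, divisor) -> tuple:
--     if x % divisor == 0 and y % divisor == 0: return (0, 0) # no need to move
--     finding_range = 1
--     x_range = -finding_range
--     y_range = -finding_range
--     square_circumference = (finding_range * 3 - finding_range) * 2 # outer-most pixels of the searching square -
--                                                                    # only needs to be multiplied by 2 and not 4 because opposite sides can be checked in each iteration
--
--     while finding_range < 500: # after 500 iterations its safe to say something went terribly wrong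
--         for i in range(square_circumference):
--             # check for result
--             if (x + x_range) % divisor == 0 and (y + y_range) % divisor == 0:
--                 return (x_range, y_range)
--             # check for opposite result
--             if (x - x_range) % divisor == 0 and (y - y_range) % divisor == 0:
--                 return (-x_range, -y_range)
--             if x_range < finding_range:
--                 x_range += 1
--             else:
--                 y_range += 1
--
--         finding_range += 1
--         square_circumference = (finding_range * 3 - finding_range) * 2
--         x_range = -finding_range
--         y_range = -finding_range
-- ===== SOURCE B (Python) =====
-- def find_distance_to_nearest_grid_space(x, y, divisor) -> tuple:
--     # Compute the minimal Chebyshev radius algebraically, then scan only that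
--     # single square perimeter (in the same order A scans it).
--     m = abs(divisor)
--     cx = x % m
--     cy = y % m
--     if cx == 0 and cy == 0:
--         return (0, 0)
--     r = max(min(cx, m - cx), min(cy, m - cy))
--     if r >= 500:
--         return None
--     for i in range(4 * r):
--         if i <= 2 * r:
--             dx, dy = -r + i, -r
--         else:
--             dx, dy = r, i - 3 * r
--         if (x + dx) % m == 0 and (y + dy) % m == 0:
--             return (dx, dy)
--         if (x - dx) % m == 0 and (y - dy) % m == 0:
--             return (-dx, -dy)
-- ===== Notes on version B (the rewrite author's own statement) =====
-- stated objective: faster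
-- what changed: B derives the minimal Chebyshev radius in O(1) from the two residues x%|d| and y%|d| and scans only that one square perimeter in A's order, instead of A's expanding-square search over every radius.
import Mathlib
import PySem

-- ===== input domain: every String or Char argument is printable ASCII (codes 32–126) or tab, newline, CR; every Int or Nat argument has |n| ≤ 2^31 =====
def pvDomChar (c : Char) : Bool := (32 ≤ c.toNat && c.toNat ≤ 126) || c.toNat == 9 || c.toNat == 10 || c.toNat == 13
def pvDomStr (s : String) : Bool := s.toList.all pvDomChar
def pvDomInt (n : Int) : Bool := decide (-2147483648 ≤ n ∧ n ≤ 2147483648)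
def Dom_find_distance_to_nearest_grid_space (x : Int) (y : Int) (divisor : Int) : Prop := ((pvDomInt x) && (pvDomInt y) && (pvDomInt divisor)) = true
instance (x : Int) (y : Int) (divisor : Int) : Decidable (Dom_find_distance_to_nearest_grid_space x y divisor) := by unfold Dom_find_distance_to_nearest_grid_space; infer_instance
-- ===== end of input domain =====

-- B computes the minimal Chebyshev search radius algebraically from the two residues and scans
-- only that single square perimeter (in A's order), instead of A's full expanding-square search;
-- the claim is return-value equivalence for divisor ≠ 0 (A raises ZeroDivisionError at 0).

-- ===== PORT A =====
-- inner `for i in range(square_circumference)` loop of A, state (x_range, y_range), fuel = remaining iterations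
def pvInnerA (x y divisor r : Int) : Int → Int → Nat → Option (Int × Int)
  | _, _, 0 => none
  | xr, yr, n+1 =>
    if PySem.Int.mod (x + xr) divisor = 0 ∧ PySem.Int.mod (y + yr) divisor = 0 then some (xr, yr)
    else if PySem.Int.mod (x - xr) divisor = 0 ∧ PySem.Int.mod (y - yr) divisor = 0 then some (-xr, -yr)
    else if xr < r then pvInnerA x y divisor r (xr + 1) yr n
    else pvInnerA x y divisor r xr (yr + 1) n

-- outer `while finding_range < 500` loop; fuel 500 suffices (guard fails at r = 500)
def pvWhileA (x y divisor : Int) : Int → Nat → Option (Int × Int)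
  | _, 0 => none
  | r, fuel+1 =>
    if r < 500 then
      match pvInnerA x y divisor r (-r) (-r) ((r * 3 - r) * 2).toNat with
      | some v => some v
      | none => pvWhileA x y divisor (r + 1) fuel
    else none

def find_distance_to_nearest_grid_space (x : Int) (y : Int) (divisor : Int) : Option (Int × Int) :=
  if PySem.Int.mod x divisor = 0 ∧ PySem.Int.mod y divisor = 0 then some (0, 0)
  else pvWhileA x y divisor 1 500

-- ===== PORT B =====
-- the i-th perimeter point of the square of Chebyshev radius r, in Source B's order
def pvPt (r i : Int) : Int × Int := if i ≤ 2 * r then (-r + i, -r) else (r, i - 3 * r)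

-- Source B's `for i in range(4*r)` loop; fuel = remaining iterations, i = current index
def pvScanB (x y m r : Int) : Nat → Int → Option (Int × Int)
  | 0, _ => none
  | n+1, i =>
    let p := pvPt r i
    if PySem.Int.mod (x + p.1) m = 0 ∧ PySem.Int.mod (y + p.2) m = 0 then some p
    else if PySem.Int.mod (x - p.1) m = 0 ∧ PySem.Int.mod (y - p.2) m = 0 then some (-p.1, -p.2)
    else pvScanB x y m r n (i + 1)

def find_distance_to_nearest_grid_space_alt (x : Int) (y : Int) (divisor : Int) : Option (Int × Int) :=
  let m := |divisor|
  let cx := PySem.Int.mod x m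
  let cy := PySem.Int.mod y m
  if cx = 0 ∧ cy = 0 then some (0, 0)
  else
    let r := max (min cx (m - cx)) (min cy (m - cy))
    if 500 ≤ r then none
    else pvScanB x y m r (4 * r).toNat 0

-- ===== PRECONDITION & SPEC =====
-- Pre_ excludes exactly divisor = 0, where Python A raises ZeroDivisionError on `x % divisor`.
def Pre_find_distance_to_nearest_grid_space (x : Int) (y : Int) (divisor : Int) : Prop := divisor ≠ 0
instance (x : Int) (y : Int) (divisor : Int) : Decidable (Pre_find_distance_to_nearest_grid_space x y divisor) := by unfold Pre_find_distance_to_nearest_grid_space; infer_instance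
def pvWitness_find_distance_to_nearest_grid_space : Int × Int × Int := (7, 4, 5)

def Spec_find_distance_to_nearest_grid_space (x : Int) (y : Int) (divisor : Int) (out : Option (Int × Int)) : Prop := out = find_distance_to_nearest_grid_space_alt x y divisor
instance (x : Int) (y : Int) (divisor : Int) (out : Option (Int × Int)) : Decidable (Spec_find_distance_to_nearest_grid_space x y divisor out) := by unfold Spec_find_distance_to_nearest_grid_space; infer_instance

-- ===== CLAIM (what is proved, stated in full; the proofs are below) =====
def Claim_equal_find_distance_to_nearest_grid_space : Prop := ∀ (x : Int) (y : Int) (divisor : Int), Dom_find_distance_to_nearest_grid_space x y divisor → Pre_find_distance_to_nearest_grid_space x y divisor → Spec_find_distance_to_nearest_grid_space x y divisor (find_distance_to_nearest_grid_space x y divisor)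

-- ===== LEMMAS AND PROOFS =====

-- zero tests against `divisor` and against `|divisor|` agree
theorem pv_modz (divisor t : Int) :
    (PySem.Int.mod t divisor = 0) ↔ (PySem.Int.mod t |divisor| = 0) := by
  rw [PySem.Int.mod_eq_zero_iff_dvd, PySem.Int.mod_eq_zero_iff_dvd, abs_dvd]

-- m divides x - (x mod m)
theorem pv_dvd_sub_mod (x m : Int) (hm : 0 < m) : m ∣ (x - PySem.Int.mod x m) := by
  have h := PySem.Int.floordiv_mul_add_mod x m
  exact ⟨PySem.Int.floordiv x m, by rw [mul_comm]; omega⟩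

-- any offset dx with (x+dx) % m == 0 has |dx| ≥ min(cx, m-cx)
theorem pv_sol_abs_ge (x m dx : Int) (hm : 0 < m)
    (h : PySem.Int.mod (x + dx) m = 0) :
    min (PySem.Int.mod x m) (m - PySem.Int.mod x m) ≤ |dx| := by
  set c := PySem.Int.mod x m with hc
  have hc0 : 0 ≤ c := PySem.Int.mod_nonneg x hm
  have hcm : c < m := PySem.Int.mod_lt x hm
  have h1 : m ∣ (x + dx) := (PySem.Int.mod_eq_zero_iff_dvd _ _).mp h
  have h2 : m ∣ (dx + c) := by
    have := dvd_sub h1 (pv_dvd_sub_mod x m hm)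
    have he : (x + dx) - (x - c) = dx + c := by ring
    rwa [he] at this
  by_contra hlt
  rw [not_le] at hlt
  rw [abs_lt] at hlt
  rw [lt_min_iff] at hlt
  have hpos : 0 < dx + c := by omega
  have := Int.le_of_dvd hpos h2
  omega

-- the closest representative offset, and that it is a solution of the right size
theorem pv_rep_spec (x m : Int) (hm : 0 < m) :
    ∃ dx : Int, PySem.Int.mod (x + dx) m = 0 ∧
      |dx| = min (PySem.Int.mod x m) (m - PySem.Int.mod x m) := by
  set c := PySem.Int.mod x m with hc
  have hc0 : 0 ≤ c := PySem.Int.mod_nonneg x hm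
  have hcm : c < m := PySem.Int.mod_lt x hm
  have h2 : m ∣ (x - c) := pv_dvd_sub_mod x m hm
  by_cases hle : c ≤ m - c
  · refine ⟨-c, ?_, ?_⟩
    · rw [PySem.Int.mod_eq_zero_iff_dvd]
      have he : x + -c = x - c := by ring
      rwa [he]
    · rw [abs_neg, abs_of_nonneg hc0]; omega
  · refine ⟨m - c, ?_, ?_⟩
    · rw [PySem.Int.mod_eq_zero_iff_dvd]
      have he : x + (m - c) = (x - c) + m := by ring
      rw [he]; exact dvd_add h2 dvd_rfl
    · rw [abs_of_nonneg (by omega)]; omega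

-- one step of A's (x_range, y_range) update moves pvPt r i to pvPt r (i+1)
theorem pv_pt_step (r i : Int) (_hr : 1 ≤ r) (_hi : 0 ≤ i) :
    (if (pvPt r i).1 < r then ((pvPt r i).1 + 1, (pvPt r i).2)
     else ((pvPt r i).1, (pvPt r i).2 + 1)) = pvPt r (i + 1) := by
  simp only [pvPt]
  split_ifs <;> simp_all [Prod.ext_iff] <;> omega

-- coordinates of scanned perimeter points are bounded by r
theorem pv_pt_bounds (r i : Int) (hr : 1 ≤ r) (hi : 0 ≤ i) (hi2 : i < 4 * r) :
    |(pvPt r i).1| ≤ r ∧ |(pvPt r i).2| ≤ r := by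
  simp only [pvPt]
  split_ifs <;> constructor <;> simp [abs_le] <;> omega

-- every point of the perimeter (Chebyshev norm exactly r) is pvPt r i or its negation, i < 4r
theorem pv_pt_cover (r a b : Int) (hr : 1 ≤ r) (ha : |a| ≤ r) (hb : |b| ≤ r)
    (hmax : |a| = r ∨ |b| = r) :
    ∃ i : Int, 0 ≤ i ∧ i < 4 * r ∧ (pvPt r i = (a, b) ∨ pvPt r i = (-a, -b)) := by
  rw [abs_le] at ha hb
  have habs : a = r ∨ a = -r ∨ b = r ∨ b = -r := by
    rcases hmax with h | h
    · rcases abs_cases a with ⟨h1, _⟩ | ⟨h1, _⟩ <;> omega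
    · rcases abs_cases b with ⟨h1, _⟩ | ⟨h1, _⟩ <;> omega
  by_cases hb1 : b = -r
  · refine ⟨a + r, by omega, by omega, Or.inl ?_⟩
    simp only [pvPt]; rw [if_pos (by omega)]
    simp only [Prod.mk.injEq]; constructor <;> omega
  by_cases hb2 : b = r
  · refine ⟨r - a, by omega, by omega, Or.inr ?_⟩
    simp only [pvPt]; rw [if_pos (by omega)]
    simp only [Prod.mk.injEq]; constructor <;> omega
  have har : a = r ∨ a = -r := by tauto
  rcases har with ha' | ha'
  · refine ⟨3 * r + b, by omega, by omega, Or.inl ?_⟩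
    simp only [pvPt]; rw [if_neg (by omega)]
    simp only [Prod.mk.injEq]; constructor <;> omega
  · refine ⟨3 * r - b, by omega, by omega, Or.inr ?_⟩
    simp only [pvPt]; rw [if_neg (by omega)]
    simp only [Prod.mk.injEq]; constructor <;> omega

-- A's inner loop, started anywhere on the perimeter walk, is B's indexed scan
theorem pv_inner_eq_scan (x y divisor r : Int) (hd : divisor ≠ 0) (hr : 1 ≤ r) :
    ∀ (n : Nat) (i : Int), 0 ≤ i →
      pvInnerA x y divisor r (pvPt r i).1 (pvPt r i).2 n = pvScanB x y |divisor| r n i := by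
  intro n
  induction n with
  | zero => intro i _; rfl
  | succ n ih =>
    intro i hi
    simp only [pvInnerA, pvScanB, pv_modz divisor]
    split_ifs with h1 h2 h3
    · rfl
    · rfl
    · have hstep := pv_pt_step r i hr hi
      rw [if_pos h3] at hstep
      have := ih (i + 1) (by omega)
      rw [← hstep] at this
      exact this
    · have hstep := pv_pt_step r i hr hi
      rw [if_neg h3] at hstep
      have := ih (i + 1) (by omega)
      rw [← hstep] at this
      exact this

-- if B's scan returns none, no scanned index was a hit
theorem pv_scan_none (x y m r : Int) :
    ∀ (n : Nat) (i : Int), pvScanB x y m r n i = none →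
      ∀ j : Int, i ≤ j → j < i + n →
        ¬ (PySem.Int.mod (x + (pvPt r j).1) m = 0 ∧ PySem.Int.mod (y + (pvPt r j).2) m = 0) ∧
        ¬ (PySem.Int.mod (x - (pvPt r j).1) m = 0 ∧ PySem.Int.mod (y - (pvPt r j).2) m = 0) := by
  intro n
  induction n with
  | zero => intro i _ j h1 h2; omega
  | succ n ih =>
    intro i hnone j h1 h2
    simp only [pvScanB] at hnone
    split_ifs at hnone with c1 c2
    by_cases hj : j = i
    · subst hj; exact ⟨c1, c2⟩
    · exact ih (i + 1) hnone j (by omega) (by omega)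

-- below the minimal radius every scan comes up empty
theorem pv_scan_small_none (x y m r : Int) (hm : 0 < m) (hr : 1 ≤ r)
    (hx : r < min (PySem.Int.mod x m) (m - PySem.Int.mod x m) ∨
          r < min (PySem.Int.mod y m) (m - PySem.Int.mod y m)) :
    ∀ (n : Nat) (i : Int), 0 ≤ i → i + n ≤ 4 * r → pvScanB x y m r n i = none := by
  intro n
  induction n with
  | zero => intro i _ _; rfl
  | succ n ih =>
    intro i hi hin
    have hb := pv_pt_bounds r i hr hi (by omega)
    simp only [pvScanB]
    have k1 : ¬ (PySem.Int.mod (x + (pvPt r i).1) m = 0 ∧ PySem.Int.mod (y + (pvPt r i).2) m = 0) := by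
      rintro ⟨u, v⟩
      rcases hx with h | h
      · have := pv_sol_abs_ge x m (pvPt r i).1 hm u; omega
      · have := pv_sol_abs_ge y m (pvPt r i).2 hm v; omega
    have k2 : ¬ (PySem.Int.mod (x - (pvPt r i).1) m = 0 ∧ PySem.Int.mod (y - (pvPt r i).2) m = 0) := by
      rintro ⟨u, v⟩
      rw [sub_eq_add_neg] at u v
      rcases hx with h | h
      · have := pv_sol_abs_ge x m (-(pvPt r i).1) hm u; rw [abs_neg] at this; omega
      · have := pv_sol_abs_ge y m (-(pvPt r i).2) hm v; rw [abs_neg] at this; omega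
    rw [if_neg k1, if_neg k2]
    exact ih (i + 1) (by omega) (by omega)

-- at the minimal radius the scan finds something
theorem pv_scan_min_some (x y m : Int) (hm : 0 < m)
    (r : Int)
    (hr : r = max (min (PySem.Int.mod x m) (m - PySem.Int.mod x m))
                  (min (PySem.Int.mod y m) (m - PySem.Int.mod y m)))
    (hr1 : 1 ≤ r) :
    pvScanB x y m r (4 * r).toNat 0 ≠ none := by
  obtain ⟨a, hax, haabs⟩ := pv_rep_spec x m hm
  obtain ⟨b, hby, hbabs⟩ := pv_rep_spec y m hm
  have ha : |a| ≤ r := by rw [haabs]; omega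
  have hb : |b| ≤ r := by rw [hbabs]; omega
  have hmax : |a| = r ∨ |b| = r := by omega
  obtain ⟨i, hi0, hi4, hpt⟩ := pv_pt_cover r a b hr1 ha hb hmax
  intro hnone
  have hall := pv_scan_none x y m r (4 * r).toNat 0 hnone i hi0 (by omega)
  rcases hpt with hpe | hpe
  · exact hall.1 (by rw [hpe]; exact ⟨hax, hby⟩)
  · refine hall.2 ?_
    rw [hpe]
    constructor
    · have he : x - (-a) = x + a := by ring
      simpa [he] using hax
    · have he : y - (-b) = y + b := by ring
      simpa [he] using hby

-- the outer while loop walks up to the minimal radius and returns that scan's result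
theorem pv_while_reach (x y divisor rmin : Int) (hd : divisor ≠ 0)
    (hm : 0 < |divisor|)
    (hrmin : rmin = max (min (PySem.Int.mod x |divisor|) (|divisor| - PySem.Int.mod x |divisor|))
                        (min (PySem.Int.mod y |divisor|) (|divisor| - PySem.Int.mod y |divisor|)))
    (h1 : 1 ≤ rmin) (h500 : rmin < 500) :
    ∀ (fuel : Nat) (r : Int), 1 ≤ r → r ≤ rmin → r + fuel = 501 →
      pvWhileA x y divisor r fuel = pvScanB x y |divisor| rmin (4 * rmin).toNat 0 := by
  intro fuel
  induction fuel with
  | zero => intro r _ _ _; omega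
  | succ fuel ih =>
    intro r hr hle hfuel
    simp only [pvWhileA]
    rw [if_pos (by omega)]
    have hcirc : ((r * 3 - r) * 2).toNat = (4 * r).toNat := by congr 1; ring
    have heq : pvInnerA x y divisor r (-r) (-r) ((r * 3 - r) * 2).toNat
        = pvScanB x y |divisor| r (4 * r).toNat 0 := by
      rw [hcirc]
      have hpt0 : pvPt r 0 = (-r, -r) := by simp [pvPt]; omega
      have := pv_inner_eq_scan x y divisor r hd hr (4 * r).toNat 0 (by omega)
      rw [hpt0] at this
      exact this
    by_cases hcase : r = rmin
    · subst hcase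
      rw [heq]
      cases hv : pvScanB x y |divisor| r (4 * r).toNat 0 with
      | none => exact absurd hv (pv_scan_min_some x y |divisor| hm r hrmin hr)
      | some v => rfl
    · have hsm : pvScanB x y |divisor| r (4 * r).toNat 0 = none := by
        refine pv_scan_small_none x y |divisor| r hm hr ?_ (4 * r).toNat 0 (by omega) (by omega)
        omega
      rw [heq, hsm]
      exact ih (r + 1) (by omega) (by omega) (by omega)

-- when the minimal radius is out of reach the while loop exhausts and returns none
theorem pv_while_none (x y divisor rmin : Int) (hd : divisor ≠ 0)
    (hm : 0 < |divisor|)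
    (hrmin : rmin = max (min (PySem.Int.mod x |divisor|) (|divisor| - PySem.Int.mod x |divisor|))
                        (min (PySem.Int.mod y |divisor|) (|divisor| - PySem.Int.mod y |divisor|)))
    (h500 : 500 ≤ rmin) :
    ∀ (fuel : Nat) (r : Int), 1 ≤ r → pvWhileA x y divisor r fuel = none := by
  intro fuel
  induction fuel with
  | zero => intro r _; rfl
  | succ fuel ih =>
    intro r hr
    simp only [pvWhileA]
    by_cases hg : r < 500
    · rw [if_pos hg]
      have hcirc : ((r * 3 - r) * 2).toNat = (4 * r).toNat := by congr 1; ring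
      have hpt0 : pvPt r 0 = (-r, -r) := by simp [pvPt]; omega
      have heq := pv_inner_eq_scan x y divisor r hd hr (4 * r).toNat 0 (by omega)
      rw [hpt0] at heq
      have hsm : pvScanB x y |divisor| r (4 * r).toNat 0 = none := by
        refine pv_scan_small_none x y |divisor| r hm hr ?_ (4 * r).toNat 0 (by omega) (by omega)
        omega
      rw [hcirc, heq, hsm]
      exact ih (r + 1) (by omega)
    · rw [if_neg hg]

-- ===== VERDICT (by name: the statement is the Claim_ definition above) =====
theorem find_distance_to_nearest_grid_space_spec : Claim_equal_find_distance_to_nearest_grid_space := by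
  intro x y divisor _ hd
  have hd' : divisor ≠ 0 := hd
  have hm : 0 < |divisor| := abs_pos.mpr hd'
  have hcx0 : 0 ≤ PySem.Int.mod x |divisor| := PySem.Int.mod_nonneg x hm
  have hcxm : PySem.Int.mod x |divisor| < |divisor| := PySem.Int.mod_lt x hm
  have hcy0 : 0 ≤ PySem.Int.mod y |divisor| := PySem.Int.mod_nonneg y hm
  have hcym : PySem.Int.mod y |divisor| < |divisor| := PySem.Int.mod_lt y hm
  unfold Spec_find_distance_to_nearest_grid_space
  show (if PySem.Int.mod x divisor = 0 ∧ PySem.Int.mod y divisor = 0 then some (0, 0)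
        else pvWhileA x y divisor 1 500) =
       (if PySem.Int.mod x |divisor| = 0 ∧ PySem.Int.mod y |divisor| = 0 then some ((0 : Int), (0 : Int))
        else if 500 ≤ max (min (PySem.Int.mod x |divisor|) (|divisor| - PySem.Int.mod x |divisor|))
                          (min (PySem.Int.mod y |divisor|) (|divisor| - PySem.Int.mod y |divisor|)) then none
        else pvScanB x y |divisor|
               (max (min (PySem.Int.mod x |divisor|) (|divisor| - PySem.Int.mod x |divisor|))
                    (min (PySem.Int.mod y |divisor|) (|divisor| - PySem.Int.mod y |divisor|)))
               (4 * max (min (PySem.Int.mod x |divisor|) (|divisor| - PySem.Int.mod x |divisor|))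
                        (min (PySem.Int.mod y |divisor|) (|divisor| - PySem.Int.mod y |divisor|))).toNat 0)
  set rmin := max (min (PySem.Int.mod x |divisor|) (|divisor| - PySem.Int.mod x |divisor|))
                  (min (PySem.Int.mod y |divisor|) (|divisor| - PySem.Int.mod y |divisor|)) with hrmin
  by_cases hz : PySem.Int.mod x |divisor| = 0 ∧ PySem.Int.mod y |divisor| = 0
  · rw [if_pos ⟨(pv_modz divisor x).mpr hz.1, (pv_modz divisor y).mpr hz.2⟩, if_pos hz]
  · have hz' : ¬ (PySem.Int.mod x divisor = 0 ∧ PySem.Int.mod y divisor = 0) := by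
      rw [pv_modz divisor x, pv_modz divisor y]; exact hz
    rw [if_neg hz', if_neg hz]
    have h1 : 1 ≤ rmin := by omega
    by_cases h500 : 500 ≤ rmin
    · rw [if_pos h500]
      exact pv_while_none x y divisor rmin hd' hm hrmin h500 500 1 (by omega)
    · rw [if_neg h500]
      exact pv_while_reach x y divisor rmin hd' hm hrmin h1 (by omega) 500 1 (by omega) (by omega) (by omega)
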